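-- pv_equiv track=rewrite | github.com/ssudev/algorithm | 실전 문제 유형/그리디 문제/무지의 먹방 라이브/solution.py | solution
-- ===== SOURCE A (Python) =====
-- def solution(food_times, k):
--     answer = 0
--     index = -1
--
--     for i in range(1, k+2):
--         index += 1
--
--         if index == len(food_times):
--             index = 0
--
--         if food_times[index] != 0:
--             food_times[index] -= 1
--         elif food_times[index] == 0:
--             temp_index = index
--
--             while True:
--                 index += 1
--                 if index == len(food_times):
--                     index = 0
--
--                 if index == temp_index:
--                     index = -1
--                     break
--
--                 if food_times[index] != 0:
--                     food_times[index] -= 1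
--                     break
--         if index == -1:
--             answer = -1
--             return answer
--
--     answer = index + 1
--
--     return answer
-- ===== SOURCE B (Python) =====
-- def solution(food_times, k):
--     """Event-driven simulation: keep the foods that still have time left in a
--     queue (in index order) and consume whole round-robin rounds at once,
--     jumping directly to the next moment a food runs out; once fewer steps
--     remain than foods in the queue, index the answer directly."""
--     q = [(i, t) for i, t in enumerate(food_times) if t != 0]
--     steps = k + 1
--     while q:
--         n = len(q)
--         if steps <= n:
--             return q[steps - 1][0] + 1
--         rounds = (steps - 1) // n
--         expiring = [t for _, t in q if 0 < t <= rounds]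
--         if expiring:
--             rounds = min(expiring)
--         q = [(i, t - rounds) for i, t in q if t != rounds]
--         steps -= rounds * n
--     return -1
-- ===== Notes on version B (the rewrite author's own statement) =====
-- stated objective: alternative
-- what changed: A eats one portion per iteration of a k+1-step loop with an inner cyclic scan skipping exhausted foods; B builds a queue of foods with time left once and consumes whole round-robin rounds at a time, jumping straight to the next moment a food runs out and indexing the answer directly. Pre_ excludes negative k — outside the problem's domain (k counts elapsed seconds; A returns 0 there, B raises IndexError for k < -len(queue)) — and the empty food list with k >= 0, on which A raises IndexError.
-- outside the precondition, e.g. on solution([1, 2], -5): A returns 0, B raises IndexError; on solution([1, 2], -2): A returns 0, B returns 1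
import Mathlib
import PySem

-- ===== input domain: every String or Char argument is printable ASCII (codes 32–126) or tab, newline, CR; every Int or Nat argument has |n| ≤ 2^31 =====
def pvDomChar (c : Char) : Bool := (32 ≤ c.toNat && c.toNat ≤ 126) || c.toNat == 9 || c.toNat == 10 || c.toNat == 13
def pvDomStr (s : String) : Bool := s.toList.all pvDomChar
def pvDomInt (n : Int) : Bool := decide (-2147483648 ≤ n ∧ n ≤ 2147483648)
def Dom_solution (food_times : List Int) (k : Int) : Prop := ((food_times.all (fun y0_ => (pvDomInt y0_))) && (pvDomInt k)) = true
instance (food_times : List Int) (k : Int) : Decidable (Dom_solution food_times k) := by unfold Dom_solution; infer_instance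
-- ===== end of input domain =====

-- B replaces A's one-portion-per-iteration cyclic simulation by a queue of foods with time
-- left, consumed whole round-robin rounds at a time (jumping to the next moment a food runs
-- out); equivalence is about the RETURN value only (A mutates food_times in place, B does not).

-- ===== PORT A =====
-- inner `while True:` search loop of A; it wraps around to `temp` after at most
-- `food_times.length` increments, so fuel `ft.length + 1` always reaches Python's `break`.
-- `pyGetD _ _ 0` / `pySetD`: the index is provably in range at every reachable call under Pre_.
def solutionSearch (ft : List Int) (index temp : Int) : Nat → List Int × Int
  | 0 => (ft, index)
  | fuel + 1 =>
    let index1 := index + 1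
    let index2 := if index1 = PySem.List.len ft then 0 else index1
    if index2 = temp then (ft, -1)
    else
      let v := PySem.List.pyGetD ft index2 0
      if v ≠ 0 then (PySem.List.pySetD ft index2 (v - 1), index2)
      else solutionSearch ft index2 temp fuel

-- one iteration of A's `for i in range(1, k+2)` body; `none` = the early `return -1`
def solutionStep (st : Option (List Int × Int)) : Option (List Int × Int) :=
  match st with
  | none => none
  | some (ft, index) =>
    let index1 := index + 1
    let index2 := if index1 = PySem.List.len ft then 0 else index1
    let v := PySem.List.pyGetD ft index2 0
    if v ≠ 0 then some (PySem.List.pySetD ft index2 (v - 1), index2)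
    else
      let r := solutionSearch ft index2 index2 (ft.length + 1)
      if r.2 = -1 then none else some r

-- `for i in range(1, k+2)` runs (k+2-1).toNat iterations; Python's range is lazy and the
-- loop can `return -1` early, so it is ported as a counted recursion that short-circuits on
-- `none` (the early return) instead of materializing the range.
def solutionLoop : Nat → Option (List Int × Int) → Option (List Int × Int)
  | 0, st => st
  | m + 1, st =>
    match st with
    | none => none
    | some s => solutionLoop m (solutionStep (some s))

def solution (food_times : List Int) (k : Int) : Int :=
  match solutionLoop (k + 2 - 1).toNat (some (food_times, -1)) with
  | none => -1
  | some (_, index) => index + 1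

-- ===== PORT B =====
-- Source B's `while q:` loop; each pass strictly decreases `steps` (proved below), so
-- `fuel = steps.toNat` bounds the iteration count; the fuel-0 fallback is unreachable.
def solutionAltLoop (fuel : Nat) (q : List (Int × Int)) (steps : Int) : Int :=
  if q = [] then -1
  else
    let n : Int := PySem.List.len q
    if steps ≤ n then (PySem.List.pyGetD q (steps - 1) (0, 0)).1 + 1
    else
      let rounds0 := PySem.Int.floordiv (steps - 1) n
      let expiring := (q.filter (fun p => decide (0 < p.2 ∧ p.2 ≤ rounds0))).map (fun p => p.2)
      let rounds := if expiring = [] then rounds0 else (PySem.List.min? expiring (fun t => t)).getD 0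
      match fuel with
      | 0 => -1  -- unreachable: steps strictly decreases and stays positive
      | fuel + 1 =>
        solutionAltLoop fuel ((q.filter (fun p => decide (p.2 ≠ rounds))).map (fun p => (p.1, p.2 - rounds))) (steps - rounds * n)

def solution_alt (food_times : List Int) (k : Int) : Int :=
  let q := (PySem.List.enumerate food_times).filter (fun p => decide (p.2 ≠ 0))
  solutionAltLoop (k + 1).toNat q (k + 1)

-- ===== PRECONDITION & SPEC =====
-- Pre_ restricts to the problem's natural domain: a nonempty food list (on [] with k ≥ 0 A
-- raises IndexError) and k ≥ 0 — a negative number of elapsed seconds is outside the task's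
-- domain; there A returns 0 while B raises IndexError for k < -len(queue).
def Pre_solution (food_times : List Int) (k : Int) : Prop := food_times ≠ [] ∧ 0 ≤ k
instance (food_times : List Int) (k : Int) : Decidable (Pre_solution food_times k) := by unfold Pre_solution; infer_instance

def pvWitness_solution : List Int × Int := ([3, 1, 2], 5)

def Spec_solution (food_times : List Int) (k : Int) (out : Int) : Prop := out = solution_alt food_times k
instance (food_times : List Int) (k : Int) (out : Int) : Decidable (Spec_solution food_times k out) := by unfold Spec_solution; infer_instance

-- ===== CLAIM (what is proved, stated in full; the proofs are below) =====
def Claim_equal_solution : Prop := ∀ (food_times : List Int) (k : Int), Dom_solution food_times k → Pre_solution food_times k → Spec_solution food_times k (solution food_times k)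

-- ===== LEMMAS AND PROOFS =====

-- the reference semantics both ports are reduced to: a queue of (index, time) pairs with all
-- times ≠ 0; one entry is eaten per step, re-queued with time-1 unless that hits 0;
-- `specS q m` is A's answer after eating m+1 portions (−1 once the queue is empty).
def specS : List (Int × Int) → Nat → Int
  | [], _ => -1
  | (i, _) :: _, 0 => i + 1
  | (i, t) :: r, m + 1 => specS (r ++ if t = 1 then [] else [(i, t - 1)]) m
termination_by _ m => m

def decBy (j : Int) (q : List (Int × Int)) : List (Int × Int) :=
  (q.filter (fun p => decide (p.2 ≠ j))).map (fun p => (p.1, p.2 - j))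

-- A-side abstraction: positions n-cycle starting at j, and the alive-queue view of a state
def posList (n j : Nat) : List Nat := (List.range n).rotate j
def rotE (ft : List Int) (j : Nat) : List (Int × Int) :=
  (posList ft.length j).map (fun (p : Nat) => ((p : Int), ft.getD p 0))
def absQ (ft : List Int) (j : Nat) : List (Int × Int) :=
  (rotE ft j).filter (fun p => decide (p.2 ≠ 0))
def wrapIdx (ft : List Int) (idx : Int) : Nat :=
  if idx + 1 = (ft.length : Int) then 0 else (idx + 1).toNat
def ansOf : Option (List Int × Int) → Int
  | none => -1
  | some (_, index) => index + 1

lemma specS_nil (m : Nat) : specS [] m = -1 := by simp [specS]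

lemma decBy_cons (j : Int) (i t : Int) (r : List (Int × Int)) :
    decBy j ((i, t) :: r) = (if t = j then [] else [(i, t - j)]) ++ decBy j r := by
  simp only [decBy, List.filter_cons]
  split_ifs with h1 h2 h3 <;> simp_all

lemma specS_lt (q : List (Int × Int)) (m : Nat) (h : m < q.length) : specS q m = q[m].1 + 1 := by
  induction m generalizing q with
  | zero =>
    match q, h with
    | (i, t) :: r, _ => simp [specS]
  | succ m ih =>
    match q, h with
    | (i, t) :: r, h =>
      have hm : m < r.length := by simpa using h
      rw [specS, ih _ (by simp; omega)]
      rw [List.getElem_append_left hm]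
      simp

lemma specS_round_aux (a : List (Int × Int)) : ∀ (b : List (Int × Int)) (m : Nat),
    specS (a ++ b) (a.length + m) = specS (b ++ decBy 1 a) m := by
  induction a with
  | nil => intro b m; simp [decBy]
  | cons p a' ih =>
    intro b m
    obtain ⟨i, t⟩ := p
    have h1 : ((i, t) :: a').length + m = (a'.length + m) + 1 := by simp; omega
    rw [h1, List.cons_append, specS, List.append_assoc, ih (b ++ _) m, decBy_cons,
      List.append_assoc]

lemma specS_round (q : List (Int × Int)) (m : Nat) :
    specS q (q.length + m) = specS (decBy 1 q) m := by
  have := specS_round_aux q [] m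
  simpa using this

lemma decBy_decBy (j : Int) (hj : 1 ≤ j) : ∀ (q : List (Int × Int)),
    (∀ p ∈ q, p.2 < 0 ∨ j + 1 ≤ p.2) → decBy j (decBy 1 q) = decBy (j + 1) q := by
  intro q
  induction q with
  | nil => intro _; simp [decBy]
  | cons p q' ih =>
    intro h
    obtain ⟨i, t⟩ := p
    have ht : t < 0 ∨ j + 1 ≤ t := h (i, t) (by simp)
    have ht1 : t ≠ 1 := by omega
    have ih' := ih (fun p hp => h p (by simp [hp]))
    rw [decBy_cons, if_neg ht1]
    by_cases htj : t = j + 1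
    · rw [List.singleton_append, decBy_cons, if_pos (by omega), decBy_cons, if_pos htj]
      simpa using ih'
    · rw [List.singleton_append, decBy_cons, if_neg (by omega), decBy_cons, if_neg htj]
      have harith : t - 1 - j = t - (j + 1) := by ring
      rw [List.singleton_append, harith, ih']
      simp

lemma decBy_zero (q : List (Int × Int)) (h0 : ∀ p ∈ q, p.2 ≠ 0) : decBy 0 q = q := by
  unfold decBy
  rw [List.filter_eq_self.mpr (by intro p hp; simpa using h0 p hp)]
  simp

lemma mem_decBy (j : Int) (q : List (Int × Int)) (p' : Int × Int) (h : p' ∈ decBy j q) :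
    ∃ p ∈ q, p.2 ≠ j ∧ p' = (p.1, p.2 - j) := by
  simp only [decBy, List.mem_map, List.mem_filter, decide_eq_true_eq] at h
  obtain ⟨p, ⟨hp, hne⟩, rfl⟩ := h
  exact ⟨p, hp, hne, rfl⟩

lemma length_decBy_of_ne (j : Int) (q : List (Int × Int)) (h : ∀ p ∈ q, p.2 ≠ j) :
    (decBy j q).length = q.length := by
  unfold decBy
  rw [List.length_map, List.filter_eq_self.mpr (by intro p hp; simpa using h p hp)]

lemma specS_rounds (j : Nat) : ∀ (q : List (Int × Int)) (m : Nat),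
    (∀ p ∈ q, p.2 ≠ 0) → (∀ p ∈ q, p.2 < 0 ∨ (j : Int) ≤ p.2) →
    specS q (j * q.length + m) = specS (decBy (j : Int) q) m := by
  induction j with
  | zero => intro q m h0 _; simp [decBy_zero q h0]
  | succ j ih =>
    intro q m h0 h
    have hstep : specS q ((j + 1) * q.length + m) = specS (decBy 1 q) (j * q.length + m) := by
      have : (j + 1) * q.length + m = q.length + (j * q.length + m) := by ring
      rw [this, specS_round]
    rcases Nat.eq_zero_or_pos j with hj0 | hjpos
    · subst hj0; simpa using hstep
    · have hne1 : ∀ p ∈ q, p.2 ≠ 1 := by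
        intro p hp
        rcases h p hp with h' | h' <;> [omega; (push_cast at h'; omega)]
      have hlen : (decBy 1 q).length = q.length := length_decBy_of_ne 1 q hne1
      rw [hstep, ← hlen]
      rw [ih (decBy 1 q) m
        (by intro p hp; obtain ⟨p₀, _, hne, rfl⟩ := mem_decBy 1 q p hp; simp only; omega)
        (by intro p hp; obtain ⟨p₀, hp₀, _, rfl⟩ := mem_decBy 1 q p hp
            rcases h p₀ hp₀ with h' | h' <;> [left; right] <;> [omega; (push_cast at *; omega)])]
      rw [decBy_decBy (j : Int) (by exact_mod_cast hjpos) q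
        (by intro p hp; rcases h p hp with h' | h' <;> [left; right] <;> push_cast at * <;> omega)]
      norm_num

lemma loopB_eq_specS : ∀ (fuel : Nat) (q : List (Int × Int)) (steps : Int),
    steps.toNat ≤ fuel → 1 ≤ steps → (∀ p ∈ q, p.2 ≠ 0) →
    solutionAltLoop fuel q steps = specS q (steps - 1).toNat := by
  intro fuel
  induction fuel with
  | zero => intro q steps hfuel hsteps h0; exact absurd hfuel (by omega)
  | succ fuel ih =>
    intro q steps hfuel hsteps h0
    by_cases hq : q = []
    · subst hq
      rw [solutionAltLoop]
      simp [specS_nil]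
    · have hlen : 0 < q.length := List.length_pos_iff.mpr hq
      have hnpos : (0 : Int) < (q.length : Int) := by exact_mod_cast hlen
      rw [solutionAltLoop]
      rw [if_neg hq]
      by_cases hle : steps ≤ PySem.List.len q
      · rw [if_pos hle]
        rw [PySem.List.len_eq] at hle
        rw [PySem.List.pyGetD_eq_getElem q (0, 0) (by omega) (by omega),
          specS_lt q _ (by omega)]
      · rw [if_neg hle]
        change solutionAltLoop fuel ((q.filter (fun p => decide (p.2 ≠ (if ((q.filter (fun p => decide (0 < p.2 ∧ p.2 ≤ PySem.Int.floordiv (steps - 1) (PySem.List.len q)))).map (fun p => p.2)) = [] then PySem.Int.floordiv (steps - 1) (PySem.List.len q) else (PySem.List.min? ((q.filter (fun p => decide (0 < p.2 ∧ p.2 ≤ PySem.Int.floordiv (steps - 1) (PySem.List.len q)))).map (fun p => p.2)) (fun t => t)).getD 0)))).map (fun p => (p.1, p.2 - (if ((q.filter (fun p => decide (0 < p.2 ∧ p.2 ≤ PySem.Int.floordiv (steps - 1) (PySem.List.len q)))).map (fun p => p.2)) = [] then PySem.Int.floordiv (steps - 1) (PySem.List.len q) else (PySem.List.min? ((q.filter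 (fun p => decide (0 < p.2 ∧ p.2 ≤ PySem.Int.floordiv (steps - 1) (PySem.List.len q)))).map (fun p => p.2)) (fun t => t)).getD 0)))) (steps - (if ((q.filter (fun p => decide (0 < p.2 ∧ p.2 ≤ PySem.Int.floordiv (steps - 1) (PySem.List.len q)))).map (fun p => p.2)) = [] then PySem.Int.floordiv (steps - 1) (PySem.List.len q) else (PySem.List.min? ((q.filter (fun p => decide (0 < p.2 ∧ p.2 ≤ PySem.Int.floordiv (steps - 1) (PySem.List.len q)))).map (fun p => p.2)) (fun t => t)).getD 0) * PySem.List.len q) = specS q (steps - 1).toNat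
        rw [PySem.List.len_eq] at hle
        have hfd1 : 1 ≤ PySem.Int.floordiv (steps - 1) (q.length : Int) :=
          (PySem.Int.le_floordiv_iff_mul_le hnpos).mpr (by omega)
        have hubr0 : PySem.Int.floordiv (steps - 1) (q.length : Int) * (q.length : Int) ≤ steps - 1 := by
          have := PySem.Int.floordiv_mul_add_mod (steps - 1) (q.length : Int)
          have := PySem.Int.mod_nonneg (steps - 1) hnpos
          omega
        -- the shared tail: any rounds ≥ 1 bounded by steps-1 and below every positive time
        have key : ∀ rounds : Int, 1 ≤ rounds → rounds * (q.length : Int) ≤ steps - 1 →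
            (∀ p ∈ q, p.2 < 0 ∨ rounds ≤ p.2) →
            solutionAltLoop fuel ((q.filter (fun p => decide (p.2 ≠ rounds))).map
                (fun p => (p.1, p.2 - rounds))) (steps - rounds * (q.length : Int))
              = specS q (steps - 1).toNat := by
          intro rounds hrounds1 hub hcond
          have hlow : (q.length : Int) ≤ rounds * (q.length : Int) :=
            le_mul_of_one_le_left (by omega) hrounds1
          have hsteps' : 1 ≤ steps - rounds * (q.length : Int) := by omega
          have hfuel' : (steps - rounds * (q.length : Int)).toNat ≤ fuel := by omega
          have h0' : ∀ p ∈ decBy rounds q, p.2 ≠ 0 := by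
            intro p hp
            obtain ⟨p₀, _, hne, rfl⟩ := mem_decBy rounds q p hp
            simp only; omega
          show solutionAltLoop fuel (decBy rounds q) (steps - rounds * (q.length : Int))
              = specS q (steps - 1).toNat
          rw [ih (decBy rounds q) (steps - rounds * (q.length : Int)) hfuel' hsteps' h0']
          have hR : ((rounds.toNat : Int)) = rounds := Int.toNat_of_nonneg (by omega)
          have hcond' : ∀ p ∈ q, p.2 < 0 ∨ ((rounds.toNat : Nat) : Int) ≤ p.2 := by
            intro p hp
            rcases hcond p hp with h' | h'
            · left; exact h'
            · right; omega
          have hsplit : (steps - 1).toNat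
              = rounds.toNat * q.length + (steps - rounds * (q.length : Int) - 1).toNat := by
            have hmul : ((rounds.toNat * q.length : Nat) : Int) = rounds * (q.length : Int) := by
              push_cast [hR]; ring
            omega
          rw [hsplit, specS_rounds rounds.toNat q _ h0 hcond', hR]
        by_cases hexp : ((q.filter (fun p => decide (0 < p.2 ∧ p.2 ≤ PySem.Int.floordiv (steps - 1) (PySem.List.len q)))).map (fun p => p.2)) = []
        · rw [if_pos hexp]
          exact key (PySem.Int.floordiv (steps - 1) (PySem.List.len q)) (by rw [PySem.List.len_eq]; exact hfd1) (by rw [PySem.List.len_eq]; exact hubr0) (by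
            intro p hp
            by_cases hgt : 0 < p.2
            · right
              by_cases hle2 : p.2 ≤ PySem.Int.floordiv (steps - 1) (PySem.List.len q)
              · exfalso
                have hmem : p.2 ∈ (q.filter (fun p => decide (0 < p.2 ∧ p.2 ≤ PySem.Int.floordiv (steps - 1) (PySem.List.len q)))).map (fun p => p.2) :=
                  List.mem_map.mpr ⟨p, List.mem_filter.mpr ⟨hp, decide_eq_true ⟨hgt, hle2⟩⟩, rfl⟩
                rw [hexp] at hmem
                simp at hmem
              · omega
            · left; have := h0 p hp; omega)
        · rw [if_neg hexp]
          obtain ⟨mv, hmv⟩ : ∃ mv, PySem.List.min? ((q.filter (fun p => decide (0 < p.2 ∧ p.2 ≤ PySem.Int.floordiv (steps - 1) (PySem.List.len q)))).map (fun p => p.2)) (fun t => t) = some mv := by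
            rcases hval : PySem.List.min? ((q.filter (fun p => decide (0 < p.2 ∧ p.2 ≤ PySem.Int.floordiv (steps - 1) (PySem.List.len q)))).map (fun p => p.2)) (fun t => t) with _ | mv
            · exact absurd ((PySem.List.min?_eq_none_iff _ _).mp hval) hexp
            · exact ⟨mv, hval⟩
          have hmvrange : 0 < mv ∧ mv ≤ PySem.Int.floordiv (steps - 1) (PySem.List.len q) := by
            have hmem := PySem.List.min?_mem hmv
            obtain ⟨p, hpf, rfl⟩ := List.mem_map.mp hmem
            have := (List.mem_filter.mp hpf).2
            simpa using this
          rw [hmv]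
          simp only [Option.getD_some]
          refine key mv (by omega) ?_ ?_
          · have hmv2 : mv ≤ PySem.Int.floordiv (steps - 1) (q.length : Int) := by
              have := hmvrange.2
              rw [PySem.List.len_eq] at this
              exact this
            calc mv * (q.length : Int) ≤ PySem.Int.floordiv (steps - 1) (q.length : Int) * (q.length : Int) :=
                mul_le_mul_of_nonneg_right (by omega) (by omega)
              _ ≤ steps - 1 := hubr0
          · intro p hp
            by_cases hgt : 0 < p.2
            · right
              by_cases hle2 : p.2 ≤ PySem.Int.floordiv (steps - 1) (PySem.List.len q)
              · have hmemp : p.2 ∈ (q.filter (fun p => decide (0 < p.2 ∧ p.2 ≤ PySem.Int.floordiv (steps - 1) (PySem.List.len q)))).map (fun p => p.2) :=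
                  List.mem_map.mpr ⟨p, List.mem_filter.mpr ⟨hp, decide_eq_true ⟨hgt, hle2⟩⟩, rfl⟩
                exact PySem.List.min?_isMin hmv p.2 hmemp
              · omega
            · left; have := h0 p hp; omega

-- ---- A side ----

def scanRes (ft : List Int) (r : List (Int × Int)) : List Int × Int :=
  match r.find? (fun p => decide (p.2 ≠ 0)) with
  | none => (ft, -1)
  | some (i, t) => (ft.set i.toNat (t - 1), i)

lemma length_posList (n j : Nat) : (posList n j).length = n := by
  simp [posList]

lemma getElem_posList (n j d : Nat) (h : d < n) :
    (posList n j)[d]'(by simp [posList, h]) = (d + j) % n := by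
  simp [posList, List.getElem_rotate]

lemma length_rotE (ft : List Int) (j : Nat) : (rotE ft j).length = ft.length := by
  simp [rotE, length_posList]

lemma getElem_rotE (ft : List Int) (j d : Nat) (h : d < ft.length) :
    (rotE ft j)[d]'(by rw [length_rotE]; exact h)
      = ((((d + j) % ft.length : Nat) : Int), ft.getD ((d + j) % ft.length) 0) := by
  simp only [rotE, List.getElem_map, getElem_posList ft.length j d h]

lemma scanRes_cons (ft : List Int) (i t : Int) (r : List (Int × Int)) :
    scanRes ft ((i, t) :: r)
      = if t ≠ 0 then (ft.set i.toNat (t - 1), i) else scanRes ft r := by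
  by_cases ht : t = 0 <;> simp [scanRes, ht]

-- one-step unfolding of the search loop with `len` written as a cast (definitional)
lemma solutionSearch_succ (ft : List Int) (index temp : Int) (fuel : Nat) :
    solutionSearch ft index temp (fuel + 1)
      = if (if index + 1 = (ft.length : Int) then (0 : Int) else index + 1) = temp then (ft, -1)
        else if PySem.List.pyGetD ft (if index + 1 = (ft.length : Int) then (0 : Int) else index + 1) 0 ≠ 0
          then (PySem.List.pySetD ft (if index + 1 = (ft.length : Int) then (0 : Int) else index + 1)
                  (PySem.List.pyGetD ft (if index + 1 = (ft.length : Int) then (0 : Int) else index + 1) 0 - 1),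
                if index + 1 = (ft.length : Int) then (0 : Int) else index + 1)
          else solutionSearch ft (if index + 1 = (ft.length : Int) then (0 : Int) else index + 1) temp fuel := rfl

lemma searchA_spec (ft : List Int) (j : Nat) (hj : j < ft.length) :
    ∀ (fuel o : Nat), o < ft.length → ft.length - o ≤ fuel →
    solutionSearch ft (((j + o) % ft.length : Nat) : Int) (j : Int) fuel
      = scanRes ft ((rotE ft j).drop (o + 1)) := by
  intro fuel
  induction fuel with
  | zero => intro o ho hf; omega
  | succ fuel ih =>
    intro o ho hf
    have hn : 0 < ft.length := by omega
    have ha : (j + o) % ft.length < ft.length := Nat.mod_lt _ hn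
    have hsucc : (j + o + 1) % ft.length = ((j + o) % ft.length + 1) % ft.length :=
      (Nat.mod_add_mod (j + o) ft.length 1).symm
    rw [solutionSearch_succ]
    have hidx2 : (if ((((j + o) % ft.length : Nat) : Int) + 1 = ((ft.length : Nat) : Int)) then (0 : Int)
        else (((j + o) % ft.length : Nat) : Int) + 1) = (((j + o + 1) % ft.length : Nat) : Int) := by
      by_cases hcase : (j + o) % ft.length + 1 = ft.length
      · rw [if_pos (by exact_mod_cast hcase), hsucc, hcase, Nat.mod_self]
        norm_num
      · have h2 : ((j + o) % ft.length + 1) % ft.length = (j + o) % ft.length + 1 :=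
          Nat.mod_eq_of_lt (by omega)
        rw [if_neg (by exact_mod_cast hcase), hsucc, h2]
        push_cast
        ring
    rw [hidx2]
    by_cases hlast : o + 1 = ft.length
    · have hj' : (j + o + 1) % ft.length = j := by
        rw [show j + o + 1 = j + ft.length by omega, Nat.add_mod_right, Nat.mod_eq_of_lt hj]
      rw [if_pos (by exact_mod_cast hj'),
        show (o + 1 : Nat) = (rotE ft j).length by rw [length_rotE]; omega,
        List.drop_length]
      rfl
    · have hne : (j + o + 1) % ft.length ≠ j := by
        intro heq
        have hmodeq : j ≡ j + (o + 1) [MOD ft.length] := by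
          show j % ft.length = (j + (o + 1)) % ft.length
          rw [Nat.mod_eq_of_lt hj, show j + (o + 1) = j + o + 1 from by ring, heq]
        have hdvd : ft.length ∣ (o + 1) := by
          have := (Nat.modEq_iff_dvd' (Nat.le_add_right j (o + 1))).mp hmodeq
          simpa using this
        have := Nat.le_of_dvd (by omega) hdvd
        omega
      rw [if_neg (by intro hc; exact hne (by exact_mod_cast hc))]
      have ho1 : o + 1 < ft.length := by omega
      have hdrop : (rotE ft j).drop (o + 1)
          = ((((o + 1 + j) % ft.length : Nat) : Int), ft.getD ((o + 1 + j) % ft.length) 0)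
            :: (rotE ft j).drop (o + 2) := by
        rw [List.drop_eq_getElem_cons (by rw [length_rotE]; omega), getElem_rotE ft j (o + 1) ho1]
      have hpos_eq : (o + 1 + j) % ft.length = (j + o + 1) % ft.length := by
        rw [show o + 1 + j = j + o + 1 by ring]
      rw [hdrop, hpos_eq, scanRes_cons, PySem.List.pyGetD_natCast]
      by_cases hv : ft.getD ((j + o + 1) % ft.length) 0 = 0
      · rw [if_neg (by simpa using hv), hv]
        simp only [if_neg (by norm_num : ¬ ((0:Int) ≠ 0))]
        have := ih (o + 1) ho1 (by omega)
        rw [show j + (o + 1) = j + o + 1 by ring] at this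
        exact this
      · rw [if_pos (by simpa using hv), if_pos hv,
          PySem.List.pySetD_of_nonneg ft _ (by positivity)]

-- unfolding of one outer-loop body on a live state, with `len` written as a cast (definitional)
lemma solutionStep_some (ft : List Int) (idx : Int) :
    solutionStep (some (ft, idx))
      = if PySem.List.pyGetD ft (if idx + 1 = (ft.length : Int) then (0 : Int) else idx + 1) 0 ≠ 0
          then some (PySem.List.pySetD ft (if idx + 1 = (ft.length : Int) then (0 : Int) else idx + 1)
                       (PySem.List.pyGetD ft (if idx + 1 = (ft.length : Int) then (0 : Int) else idx + 1) 0 - 1),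
                     if idx + 1 = (ft.length : Int) then (0 : Int) else idx + 1)
          else if (solutionSearch ft (if idx + 1 = (ft.length : Int) then (0 : Int) else idx + 1)
                     (if idx + 1 = (ft.length : Int) then (0 : Int) else idx + 1) (ft.length + 1)).2 = -1
            then none
            else some (solutionSearch ft (if idx + 1 = (ft.length : Int) then (0 : Int) else idx + 1)
                         (if idx + 1 = (ft.length : Int) then (0 : Int) else idx + 1) (ft.length + 1)) := rfl

lemma wrapIdx_lt (ft : List Int) (idx : Int) (hne : ft ≠ []) (_h1 : -1 ≤ idx) (h2 : idx < (ft.length : Int)) :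
    wrapIdx ft idx < ft.length := by
  have hn : 0 < ft.length := List.length_pos_iff.mpr hne
  unfold wrapIdx
  split_ifs with h <;> omega

lemma rotE_head (ft : List Int) (j : Nat) (hj : j < ft.length) :
    rotE ft j = (((j : Nat) : Int), ft.getD j 0) :: (rotE ft j).drop 1 := by
  have h := List.drop_eq_getElem_cons (show 0 < (rotE ft j).length by rw [length_rotE]; omega)
  rw [List.drop_zero] at h
  conv_lhs => rw [h]
  rw [getElem_rotE ft j 0 (by omega)]
  norm_num [Nat.mod_eq_of_lt hj]

lemma fst_nonneg_of_mem_rotE (ft : List Int) (j : Nat) (pr : Int × Int) (h : pr ∈ rotE ft j) :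
    0 ≤ pr.1 := by
  simp only [rotE, List.mem_map] at h
  obtain ⟨p, _, rfl⟩ := h
  positivity

lemma stepA_spec (ft : List Int) (idx : Int) (hne : ft ≠ []) (h1 : -1 ≤ idx) (h2 : idx < (ft.length : Int)) :
    solutionStep (some (ft, idx)) =
      match (rotE ft (wrapIdx ft idx)).find? (fun p => decide (p.2 ≠ 0)) with
      | none => none
      | some (i, t) => some (ft.set i.toNat (t - 1), i) := by
  have hn : 0 < ft.length := List.length_pos_iff.mpr hne
  have hjlt : wrapIdx ft idx < ft.length := wrapIdx_lt ft idx hne h1 h2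
  have hidx : (if idx + 1 = (ft.length : Int) then (0 : Int) else idx + 1)
      = ((wrapIdx ft idx : Nat) : Int) := by
    unfold wrapIdx
    split_ifs with h
    · norm_num
    · rw [Int.toNat_of_nonneg (by omega)]
  rw [solutionStep_some, hidx, PySem.List.pyGetD_natCast]
  conv_rhs => rw [rotE_head ft (wrapIdx ft idx) hjlt]
  rw [List.find?_cons]
  by_cases hv : ft.getD (wrapIdx ft idx) 0 = 0
  · rw [if_neg (by simpa using hv)]
    have hsearch := searchA_spec ft (wrapIdx ft idx) hjlt (ft.length + 1) 0 (by omega) (by omega)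
    rw [Nat.add_zero, Nat.mod_eq_of_lt hjlt, show (0 + 1 : Nat) = 1 from rfl] at hsearch
    rw [hsearch]
    have hv' : ft[wrapIdx ft idx]?.getD 0 = 0 := by
      rw [← List.getD_eq_getElem?_getD]; exact hv
    rcases hfind : ((rotE ft (wrapIdx ft idx)).drop 1).find? (fun p => decide (p.2 ≠ 0)) with _ | pr
    · rw [scanRes, hfind]
      norm_num [hv']
    · have hmem : pr ∈ rotE ft (wrapIdx ft idx) :=
        List.mem_of_mem_drop (List.mem_of_find?_eq_some hfind)
      have hge : 0 ≤ pr.1 := fst_nonneg_of_mem_rotE _ _ _ hmem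
      obtain ⟨i, t⟩ := pr
      simp only at hge
      rw [scanRes, hfind]
      norm_num [hv', show ¬ (i = -1) from by omega]
  · rw [if_pos (by simpa using hv)]
    rw [PySem.List.pySetD_of_nonneg ft _ (by positivity)]
    have hv' : ¬ (ft[wrapIdx ft idx]?.getD 0 = 0) := by
      rw [← List.getD_eq_getElem?_getD]; exact hv
    norm_num [hv']

lemma posList_rotate (n j : Nat) (P1 P2 : List Nat) (i₀ : Nat)
    (hdecomp : posList n j = P1 ++ i₀ :: P2) (_hn : 0 < n) (_hj : j < n) :
    posList n ((i₀ + 1) % n) = P2 ++ (P1 ++ [i₀]) := by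
  have hlenpos : (posList n j).length = n := length_posList n j
  have hlen : P1.length + (P2.length + 1) = n := by
    rw [hdecomp] at hlenpos; simp at hlenpos; omega
  have hP1lt : P1.length < n := by omega
  have hi₀ : i₀ = (P1.length + j) % n := by
    have hg := getElem_posList n j P1.length hP1lt
    have hg2 : (posList n j)[P1.length]'(by rw [hlenpos]; exact hP1lt) = i₀ := by
      rw [List.getElem_of_eq hdecomp]
      rw [List.getElem_append_right (le_refl P1.length)]
      simp
    exact hg2.symm.trans hg
  have hrot : posList n ((i₀ + 1) % n) = (List.range n).rotate (j + (P1.length + 1)) := by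
    unfold posList
    rw [← List.rotate_mod]
    conv_rhs => rw [← List.rotate_mod]
    congr 1
    rw [List.length_range, hi₀]
    calc ((P1.length + j) % n + 1) % n % n
        = ((P1.length + j) % n + 1) % n := by simp
      _ = (P1.length + j + 1) % n := Nat.mod_add_mod _ _ _
      _ = (j + (P1.length + 1)) % n := by congr 1; omega
  rw [hrot, ← List.rotate_rotate, ← posList, hdecomp]
  have hsplit : P1 ++ i₀ :: P2 = (P1 ++ [i₀]) ++ P2 := by simp
  rw [hsplit, List.rotate_eq_drop_append_take (by simp only [List.length_append, List.length_cons, List.length_nil]; omega),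
    show P1.length + 1 = (P1 ++ [i₀]).length by simp,
    List.drop_left, List.take_left]

lemma absQ_step (ft : List Int) (j : Nat) (hj : j < ft.length) (pr : Int × Int)
    (hfind : (rotE ft j).find? (fun p => decide (p.2 ≠ 0)) = some pr) :
    ∃ (i₀ : Nat) (t : Int) (rest : List (Int × Int)),
      pr = ((i₀ : Int), t) ∧ i₀ < ft.length ∧ t ≠ 0 ∧
      absQ ft j = ((i₀ : Int), t) :: rest ∧
      absQ (ft.set i₀ (t - 1)) (wrapIdx (ft.set i₀ (t - 1)) (i₀ : Int))
        = rest ++ (if t = 1 then [] else [((i₀ : Int), t - 1)]) := by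
  have hn : 0 < ft.length := by omega
  rw [rotE, List.find?_map] at hfind
  obtain ⟨i₀, hfind₀, hpr⟩ : ∃ i₀, (posList ft.length j).find?
        ((fun p => decide (p.2 ≠ 0)) ∘ (fun (p : Nat) => ((p : Int), ft.getD p 0))) = some i₀
      ∧ pr = ((i₀ : Int), ft.getD i₀ 0) := by
    rcases h : (posList ft.length j).find?
        ((fun p => decide (p.2 ≠ 0)) ∘ (fun (p : Nat) => ((p : Int), ft.getD p 0))) with _ | i₀
    · rw [h] at hfind; simp at hfind
    · rw [h] at hfind; simp only [Option.map_some, Option.some_inj] at hfind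
      exact ⟨i₀, h, hfind.symm⟩
  obtain ⟨hpred, P1, P2, hdecomp, hP1⟩ := List.find?_eq_some_iff_append.mp hfind₀
  have hmem : i₀ ∈ posList ft.length j := by rw [hdecomp]; simp
  have hi₀lt : i₀ < ft.length := by
    rw [posList, List.mem_rotate, List.mem_range] at hmem
    exact hmem
  have ht : ft.getD i₀ 0 ≠ 0 := by simpa using hpred
  have hnodup : (P1 ++ i₀ :: P2).Nodup := by
    rw [← hdecomp, posList]
    exact List.nodup_rotate.mpr (List.nodup_range)
  have hi₀P1 : i₀ ∉ P1 := by
    intro hin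
    exact List.disjoint_of_nodup_append hnodup hin (by simp)
  have hi₀P2 : i₀ ∉ P2 :=
    (List.nodup_cons.mp (hnodup.sublist (List.sublist_append_right P1 _))).1
  have hP1z : ∀ p ∈ P1, ft.getD p 0 = 0 := by
    intro p hp
    have := hP1 p hp
    simpa using this
  set t := ft.getD i₀ 0 with htdef
  have hf1 : ((P1.map (fun (p : Nat) => ((p : Int), ft.getD p 0))).filter
      (fun p => decide (p.2 ≠ 0))) = [] := by
    rw [List.filter_eq_nil_iff]
    intro x hx
    rw [List.mem_map] at hx
    obtain ⟨p, hp, rfl⟩ := hx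
    simpa using hP1z p hp
  refine ⟨i₀, t, ((P2.map (fun (p : Nat) => ((p : Int), ft.getD p 0))).filter
      (fun p => decide (p.2 ≠ 0))), hpr, hi₀lt, ht, ?_, ?_⟩
  · rw [absQ, rotE, hdecomp, List.map_append, List.map_cons, List.filter_append, hf1,
      List.nil_append, List.filter_cons]
    simp only [decide_eq_true_eq]
    rw [if_pos (by simpa using ht)]
  · have hlen' : (ft.set i₀ (t - 1)).length = ft.length := by simp
    have hw : wrapIdx (ft.set i₀ (t - 1)) ((i₀ : Int)) = (i₀ + 1) % ft.length := by
      unfold wrapIdx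
      rw [hlen']
      split_ifs with h
      · have hh : i₀ + 1 = ft.length := by exact_mod_cast h
        rw [hh, Nat.mod_self]
      · have hh : i₀ + 1 ≠ ft.length := by intro hc; exact h (by exact_mod_cast hc)
        rw [Nat.mod_eq_of_lt (by omega)]
        omega
    have hgset : ∀ p : Nat, p ≠ i₀ → (ft.set i₀ (t - 1)).getD p 0 = ft.getD p 0 := by
      intro p hp
      rw [List.getD_eq_getElem?_getD, List.getD_eq_getElem?_getD,
        List.getElem?_set_ne (by omega)]
    have hgself : (ft.set i₀ (t - 1)).getD i₀ 0 = t - 1 := by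
      rw [List.getD_eq_getElem?_getD, List.getElem?_set_self hi₀lt]
      rfl
    rw [absQ, rotE, hlen', hw, posList_rotate ft.length j P1 P2 i₀ hdecomp hn hj,
      List.map_append, List.map_append, List.filter_append, List.filter_append]
    have hmapP2 : P2.map (fun (p : Nat) => ((p : Int), (ft.set i₀ (t - 1)).getD p 0))
        = P2.map (fun (p : Nat) => ((p : Int), ft.getD p 0)) := by
      apply List.map_congr_left
      intro p hp
      rw [hgset p (by rintro rfl; exact hi₀P2 hp)]
    have hmapP1 : P1.map (fun (p : Nat) => ((p : Int), (ft.set i₀ (t - 1)).getD p 0))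
        = P1.map (fun (p : Nat) => ((p : Int), ft.getD p 0)) := by
      apply List.map_congr_left
      intro p hp
      rw [hgset p (by rintro rfl; exact hi₀P1 hp)]
    rw [hmapP2, hmapP1, hf1, List.nil_append]
    congr 1
    rw [List.map_cons, List.map_nil, hgself, List.filter_cons]
    by_cases ht1 : t = 1
    · rw [if_neg (by simp [ht1])]
      simp [ht1]
    · rw [if_pos (by simp; omega)]
      simp [ht1]

lemma absQ_nil_of_find?_none (ft : List Int) (j : Nat)
    (hfind : (rotE ft j).find? (fun p => decide (p.2 ≠ 0)) = none) : absQ ft j = [] := by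
  rw [absQ, List.filter_eq_nil_iff]
  exact List.find?_eq_none.mp hfind

lemma iter_spec : ∀ (m : Nat) (ft : List Int) (idx : Int), ft ≠ [] → -1 ≤ idx → idx < (ft.length : Int) →
    ansOf (solutionStep^[m + 1] (some (ft, idx))) = specS (absQ ft (wrapIdx ft idx)) m := by
  intro m
  induction m with
  | zero =>
    intro ft idx hne h1 h2
    rw [Function.iterate_one, stepA_spec ft idx hne h1 h2]
    rcases hfind : (rotE ft (wrapIdx ft idx)).find? (fun p => decide (p.2 ≠ 0)) with _ | pr
    · rw [hfind, absQ_nil_of_find?_none ft _ hfind]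
      show ansOf none = specS [] 0
      simp [ansOf, specS]
    · obtain ⟨i₀, t, rest, hpr, hi, ht, habs1, habs2⟩ :=
        absQ_step ft (wrapIdx ft idx) (wrapIdx_lt ft idx hne h1 h2) pr hfind
      subst hpr
      rw [hfind, habs1]
      show ansOf (some (ft.set i₀ (t - 1), (i₀ : Int))) = specS (((i₀ : Int), t) :: rest) 0
      simp [ansOf, specS]
  | succ m ih =>
    intro ft idx hne h1 h2
    rw [Function.iterate_succ_apply, stepA_spec ft idx hne h1 h2]
    rcases hfind : (rotE ft (wrapIdx ft idx)).find? (fun p => decide (p.2 ≠ 0)) with _ | pr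
    · rw [hfind, absQ_nil_of_find?_none ft _ hfind]
      show ansOf (solutionStep^[m + 1] none) = specS [] (m + 1)
      rw [Function.iterate_fixed rfl (m + 1)]
      simp [ansOf, specS_nil]
    · obtain ⟨i₀, t, rest, hpr, hi, ht, habs1, habs2⟩ :=
        absQ_step ft (wrapIdx ft idx) (wrapIdx_lt ft idx hne h1 h2) pr hfind
      subst hpr
      rw [hfind, habs1]
      show ansOf (solutionStep^[m + 1] (some (ft.set i₀ (t - 1), (i₀ : Int))))
        = specS (((i₀ : Int), t) :: rest) (m + 1)
      have hne' : ft.set i₀ (t - 1) ≠ [] := by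
        intro hc
        have h0 : (ft.set i₀ (t - 1)).length = 0 := by rw [hc]; rfl
        rw [List.length_set] at h0
        omega
      have hih := ih (ft.set i₀ (t - 1)) ((i₀ : Int)) hne' (by omega)
        (by rw [List.length_set]; exact_mod_cast hi)
      rw [hih, habs2, specS]

lemma solutionLoop_eq_iterate : ∀ (m : Nat) (st : Option (List Int × Int)),
    solutionLoop m st = solutionStep^[m] st := by
  intro m
  induction m with
  | zero => intro st; rfl
  | succ m ih =>
    intro st
    rcases st with _ | s
    · rw [show solutionLoop (m + 1) none = none from rfl,
        Function.iterate_fixed rfl (m + 1)]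
    · rw [show solutionLoop (m + 1) (some s) = solutionLoop m (solutionStep (some s)) from rfl,
        ih, Function.iterate_succ_apply]

lemma absQ_zero (ft : List Int) : absQ ft 0 = (PySem.List.enumerate ft).filter (fun p => decide (p.2 ≠ 0)) := by
  rw [absQ, rotE, posList, List.rotate_zero,
    PySem.List.enumerate_eq_map_pyRange ft 0, PySem.List.len_eq, PySem.List.pyRange_zero_nat,
    List.map_map]
  congr 1
  apply List.map_congr_left
  intro p hp
  simp [PySem.List.pyGetD_natCast]

-- ===== VERDICT (by name: the statement is the Claim_ definition above) =====
theorem solution_spec : Claim_equal_solution := by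
  unfold Claim_equal_solution
  intro ft k _ hpre
  unfold Spec_solution
  obtain ⟨hne, hk⟩ := hpre
  have hlen : 0 < ft.length := List.length_pos_iff.mpr hne
  have hA : solution ft k = specS (absQ ft 0) k.toNat := by
    unfold solution
    rw [show (k + 2 - 1).toNat = k.toNat + 1 from by omega, solutionLoop_eq_iterate]
    have hmain := iter_spec k.toNat ft (-1) hne (by norm_num) (by omega)
    have hw : wrapIdx ft (-1) = 0 := by
      unfold wrapIdx
      split_ifs <;> simp
    rw [hw] at hmain
    exact hmain
  have hB : solution_alt ft k = specS (absQ ft 0) k.toNat := by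
    simp only [solution_alt]
    rw [loopB_eq_specS (k + 1).toNat _ (k + 1) le_rfl (by omega)
        (by intro p hp; simpa using (List.mem_filter.mp hp).2),
      show k + 1 - 1 = k from by ring, absQ_zero]
  rw [hA, hB]
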